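-- pv_equiv track=rewrite | github.com/RogerMo01/thesis-miner | utils/detailed_parser.py | split_regions
-- ===== SOURCE A (Python) =====
-- def split_regions(raw: str) -> str:
--     response = []
--     potential = ""
--     for c in raw:
--         potential += c
--         if c == ')':
--             response.append(potential)
--             potential = ""
--
--     return response
-- ===== SOURCE B (Python) =====
-- def split_regions(raw: str) -> str:
--     parts = raw.split(')')
--     return [p + ')' for p in parts[:-1]]
-- ===== Notes on version B (the rewrite author's own statement) =====
-- stated objective: idiomatic
-- what changed: Replaces the character-by-character accumulator loop with a single split on the close-paren separator plus a comprehension re-appending the separator to every piece but the last.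
import Mathlib
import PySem

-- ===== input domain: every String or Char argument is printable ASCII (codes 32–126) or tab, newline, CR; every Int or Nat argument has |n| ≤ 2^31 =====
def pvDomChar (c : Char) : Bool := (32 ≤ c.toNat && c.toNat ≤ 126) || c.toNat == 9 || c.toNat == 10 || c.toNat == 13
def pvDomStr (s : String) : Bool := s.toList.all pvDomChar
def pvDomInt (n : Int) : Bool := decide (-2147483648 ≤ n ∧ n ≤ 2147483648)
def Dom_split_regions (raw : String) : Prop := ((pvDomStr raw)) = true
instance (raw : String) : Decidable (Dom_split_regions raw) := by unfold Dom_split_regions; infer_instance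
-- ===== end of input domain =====

-- B replaces A's character-by-character accumulator loop with one split(')') plus a
-- comprehension re-appending ')' (idiomatic; same O(n) cost). Equivalence is total.

-- ===== PORT A =====
-- the string buffer `potential` is carried as a List Char; String.mk converts at append time
def split_regions (raw : String) : List String :=
  (raw.toList.foldl
    (fun (st : List String × List Char) c =>
      let potential := st.2 ++ [c]
      if c == ')' then (st.1 ++ [String.mk potential], ([] : List Char))
      else (st.1, potential))
    ([], [])).1

-- ===== PORT B =====
-- raw.split(')') is ported as List.splitOn ')' on the char list (Python-exact for a
-- nonempty separator); parts[:-1] is PySem.List.slice … (some (-1)); p + ')' appends ')'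
def split_regions_alt (raw : String) : List String :=
  (PySem.List.slice (raw.toList.splitOn ')') none (some (-1))).map
    (fun p => String.mk (p ++ [')']))

-- ===== PRECONDITION & SPEC =====
def Spec_split_regions (raw : String) (out : List String) : Prop := out = split_regions_alt raw
instance (raw : String) (out : List String) : Decidable (Spec_split_regions raw out) := by unfold Spec_split_regions; infer_instance

-- ===== CLAIM (what is proved, stated in full; the proofs are below) =====
def Claim_equal_split_regions : Prop := ∀ (raw : String), Dom_split_regions raw → Spec_split_regions raw (split_regions raw)

-- ===== LEMMAS AND PROOFS =====

-- loop invariant for A's fold, stated against B's split form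
theorem pv_main (l : List Char) (acc : List String) (pot : List Char)
    (hpot : ∀ c ∈ pot, ¬ (c == ')') = true) :
    (l.foldl
      (fun (st : List String × List Char) c =>
        let potential := st.2 ++ [c]
        if c == ')' then (st.1 ++ [String.mk potential], ([] : List Char))
        else (st.1, potential))
      (acc, pot)).1
    = acc ++ (((pot ++ l).splitOnP (· == ')')).dropLast.map (fun p => String.mk (p ++ [')']))) := by
  induction l generalizing acc pot with
  | nil =>
    rw [List.append_nil, List.splitOnP_eq_single _ pot hpot]
    simp
  | cons c l ih =>
    by_cases hc : c = ')'
    · subst hc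
      rw [List.foldl_cons, if_pos (by decide)]
      rw [ih (acc ++ [String.mk (pot ++ [')'])]) [] (by simp)]
      rw [List.splitOnP_first _ pot hpot ')' (by decide) l]
      rw [List.dropLast_cons_of_ne_nil (List.splitOnP_ne_nil _ l)]
      simp
    · rw [List.foldl_cons, if_neg (by simpa using hc)]
      rw [ih acc (pot ++ [c]) ?_]
      · simp
      · intro x hx
        rcases List.mem_append.1 hx with h | h
        · exact hpot x h
        · simp only [List.mem_singleton] at h; subst h; simpa using hc

-- ===== VERDICT (by name: the statement is the Claim_ definition above) =====
theorem split_regions_spec : Claim_equal_split_regions := by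
  intro raw _
  unfold Spec_split_regions split_regions split_regions_alt
  rw [pv_main raw.toList [] [] (by simp), PySem.List.slice_to_neg_one]
  simp [List.splitOn]
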